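-- pv_equiv track=rewrite | github.com/Wojti-7/logia | Zadania/logia07_zad2.py | ILEZ
-- ===== SOURCE A (Python) =====
-- sam = 'aeiouy'
--
-- def ILEZ(s):
--     o = -1
--     p = -1
--     w = 0
--     k = len(s) -1
--     while w <= len(s)-1:
--         if (s[w] in sam):
--             o = w
--         w += 1
--     while k >= 0:
--         if (s[k] in sam):
--             p = k
--         k -= 1
--     if (o == -1) and (p == -1):
--         return -2
--     elif (o == p):
--         return -1
--     else:
--         return o - p - 1
-- ===== SOURCE B (Python) =====
-- sam = 'aeiouy'
--
-- def ILEZ(s):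
--     idx = [i for i, c in enumerate(s) if c in sam]
--     if not idx:
--         return -2
--     return idx[-1] - idx[0] - 1
-- ===== Notes on version B (the rewrite author's own statement) =====
-- stated objective: simpler
-- what changed: Replaces A's two directional index-scanning while-loops and three-way branch with one build-an-index-table pass (positions of all vowels) read at its two ends, the single-vowel case collapsing into the same subtraction.
import Mathlib
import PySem

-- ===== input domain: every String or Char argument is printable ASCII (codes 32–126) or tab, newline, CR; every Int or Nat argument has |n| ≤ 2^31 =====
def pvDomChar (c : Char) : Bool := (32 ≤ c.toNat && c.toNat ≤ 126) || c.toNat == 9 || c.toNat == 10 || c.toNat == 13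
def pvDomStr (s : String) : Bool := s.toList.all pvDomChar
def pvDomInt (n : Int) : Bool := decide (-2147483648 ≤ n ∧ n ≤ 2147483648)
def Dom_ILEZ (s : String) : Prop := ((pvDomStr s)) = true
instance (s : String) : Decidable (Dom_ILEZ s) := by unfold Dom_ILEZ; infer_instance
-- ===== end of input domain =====

-- B builds the list of all vowel positions once and reads its two ends, instead of A's
-- two directional scanning loops with a three-way branch; same O(n) cost, simpler.

-- the module constant sam = 'aeiouy' (as its character list)
def samILEZ : List Char := ['a', 'e', 'i', 'o', 'u', 'y']

-- ===== PORT A =====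
-- two index loops: forward keeping the LAST vowel index in o, backward keeping the FIRST in p
def ILEZ (s : String) : Int :=
  let cs := s.toList
  let n : Int := cs.length
  let o : Int := (PySem.List.pyRange 0 n 1).foldl
    (fun o w => if samILEZ.contains (PySem.List.pyGetD cs w ' ') then w else o) (-1)
  let p : Int := (PySem.List.pyRange (n - 1) (-1) (-1)).foldl
    (fun p k => if samILEZ.contains (PySem.List.pyGetD cs k ' ') then k else p) (-1)
  if o = -1 ∧ p = -1 then -2
  else if o = p then -1
  else o - p - 1

-- ===== PORT B =====
-- idx = [i for i, c in enumerate(s) if c in sam]; empty → -2; else idx[-1] - idx[0] - 1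
def ILEZ_alt (s : String) : Int :=
  let idx : List Int :=
    ((PySem.List.enumerate s.toList).filter (fun ic => samILEZ.contains ic.2)).map (·.1)
  match idx with
  | [] => -2
  | x :: xs => (x :: xs).getLastD x - x - 1

-- ===== PRECONDITION & SPEC =====
def Spec_ILEZ (s : String) (out : Int) : Prop := out = ILEZ_alt s
instance (s : String) (out : Int) : Decidable (Spec_ILEZ s out) := by unfold Spec_ILEZ; infer_instance

-- ===== CLAIM (what is proved, stated in full; the proofs are below) =====
def Claim_equal_ILEZ : Prop := ∀ (s : String), Dom_ILEZ s → Spec_ILEZ s (ILEZ s)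

-- ===== LEMMAS AND PROOFS =====

theorem pyGetD_cons_succ (x : Char) (xs : List Char) (i : Int) (d : Char) (h : 0 ≤ i) :
    PySem.List.pyGetD (x :: xs) (i + 1) d = PySem.List.pyGetD xs i d := by
  have h1 : (0 : Int) ≤ i + 1 := by omega
  simp only [PySem.List.pyGetD, PySem.List.pyGet?, PySem.List.pyIdx?, if_pos h1, if_pos h,
    List.length_cons]
  by_cases hl : i < (xs.length : Int)
  · rw [if_pos (by push_cast; omega), if_pos hl]
    have ht : (i + 1).toNat = i.toNat + 1 := by omega
    simp [ht]
  · rw [if_neg (by push_cast; omega), if_neg hl]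
    simp

-- members of enumerate xs s: index bound below by s, and indexing recovers the character
theorem mem_enumerate_pyGetD (xs : List Char) (s i : Int) (c : Char) (d : Char)
    (h : (i, c) ∈ PySem.List.enumerate xs s) :
    s ≤ i ∧ PySem.List.pyGetD xs (i - s) d = c := by
  induction xs generalizing s with
  | nil => simp [PySem.List.enumerate] at h
  | cons x xs ih =>
    rw [PySem.List.enumerate_cons] at h
    rcases List.mem_cons.1 h with h | h
    · have h1 : i = s := congrArg Prod.fst h
      have h2 : c = x := congrArg Prod.snd h
      subst h1; subst h2
      simp [PySem.List.pyGetD_zero_cons]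
    · obtain ⟨hs, hg⟩ := ih (s + 1) h
      refine ⟨by omega, ?_⟩
      have : i - s = (i - (s + 1)) + 1 := by ring
      rw [this, pyGetD_cons_succ x xs _ d (by omega)]
      exact hg

-- selective foldl keeping the latest hit = last element of the filtered index table
theorem foldl_select_getLastD (q : Int × Char → Bool) (l : List (Int × Char)) (init : Int) :
    l.foldl (fun a ic => if q ic then ic.1 else a) init
      = ((l.filter q).map (·.1)).getLastD init := by
  induction l generalizing init with
  | nil => simp
  | cons x xs ih =>
    rw [List.foldl_cons]
    by_cases hq : q x
    · rw [if_pos hq, ih, List.filter_cons_of_pos hq, List.map_cons, List.getLastD_cons]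
    · rw [if_neg hq, ih, List.filter_cons_of_neg hq]

theorem getLastD_reverse (l : List Int) (d : Int) : l.reverse.getLastD d = l.headD d := by
  rw [List.getLastD_eq_getLast?, List.getLast?_reverse]
  cases l <;> simp

theorem head_mem_enum_nonneg (cs : List Char) (x : Int) (t : List Int)
    (h : ((PySem.List.enumerate cs).filter (fun ic => samILEZ.contains ic.2)).map (·.1) = x :: t) :
    0 ≤ x := by
  have hx : x ∈ ((PySem.List.enumerate cs).filter (fun ic => samILEZ.contains ic.2)).map (·.1) := by
    rw [h]; exact List.mem_cons_self
  obtain ⟨ic, hmem, hfst⟩ := List.mem_map.1 hx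
  obtain ⟨h0, -⟩ := mem_enumerate_pyGetD cs 0 ic.1 ic.2 ' '
    (by simpa using List.mem_of_mem_filter hmem)
  omega

-- both loops of A compute an end of B's index table
theorem loops_eq (cs : List Char) :
    ((PySem.List.pyRange 0 (cs.length : Int) 1).foldl
        (fun o w => if samILEZ.contains (PySem.List.pyGetD cs w ' ') then w else o) (-1)
      = (((PySem.List.enumerate cs).filter (fun ic => samILEZ.contains ic.2)).map (·.1)).getLastD (-1))
    ∧ ((PySem.List.pyRange ((cs.length : Int) - 1) (-1) (-1)).foldl
        (fun p k => if samILEZ.contains (PySem.List.pyGetD cs k ' ') then k else p) (-1)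
      = (((PySem.List.enumerate cs).filter (fun ic => samILEZ.contains ic.2)).map (·.1)).headD (-1)) := by
  have hrange : PySem.List.pyRange 0 (cs.length : Int) 1
      = (PySem.List.enumerate cs).map (·.1) := by
    rw [PySem.List.map_fst_enumerate]; norm_num
  have hcongr : ∀ (l : List (Int × Char)), (∀ ic ∈ l, ic ∈ PySem.List.enumerate cs) →
      l.foldl (fun a ic => if samILEZ.contains (PySem.List.pyGetD cs ic.1 ' ') then ic.1 else a) (-1)
        = l.foldl (fun a ic => if samILEZ.contains ic.2 then ic.1 else a) (-1) := by
    intro l hl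
    apply PySem.List.foldl_congr_mem
    intro acc ic hic
    obtain ⟨-, hg⟩ := mem_enumerate_pyGetD cs 0 ic.1 ic.2 ' ' (by simpa using hl ic hic)
    rw [show ic.1 - 0 = ic.1 by ring] at hg
    rw [hg]
  constructor
  · rw [hrange, List.foldl_map,
      hcongr _ (fun ic h => h), foldl_select_getLastD]
  · have hrev : PySem.List.pyRange ((cs.length : Int) - 1) (-1) (-1)
        = (PySem.List.pyRange 0 (cs.length : Int) 1).reverse := by
      rw [PySem.List.pyRange_neg_one_eq_reverse]; norm_num
    rw [hrev, hrange, ← List.map_reverse, List.foldl_map,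
      hcongr _ (fun ic h => List.mem_reverse.1 h), foldl_select_getLastD,
      List.filter_reverse, List.map_reverse, getLastD_reverse]

-- ===== VERDICT (by name: the statement is the Claim_ definition above) =====
theorem ILEZ_spec : Claim_equal_ILEZ := by
  intro s _
  unfold Spec_ILEZ ILEZ ILEZ_alt
  obtain ⟨ho, hp⟩ := loops_eq s.toList
  simp only [ho, hp]
  cases hL : ((PySem.List.enumerate s.toList).filter (fun ic => samILEZ.contains ic.2)).map (·.1) with
  | nil => simp
  | cons x t =>
    have hx : 0 ≤ x := head_mem_enum_nonneg s.toList x t hL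
    simp only [List.getLastD_cons, List.headD_cons]
    by_cases he : t.getLastD x = x
    · rw [he]
      rw [if_neg (by omega), if_pos rfl]
      omega
    · rw [if_neg (by rintro ⟨-, h2⟩; omega), if_neg he]
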